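-- pv_equiv track=rewrite | github.com/comparch-security/chipyard-random-llc | tools/hashtest/hashfun.py | sboxstage
-- ===== SOURCE A (Python) =====
-- def bitssel(a, hi, lo):
--     result = a & (~(-1 << (hi + 1)))
--     result = result >> lo
--     return result
--
-- def sbox3x3(a):
--     ina      = bitssel(a, 2, 2)
--     inb      = bitssel(a, 1, 1)
--     inc      = bitssel(a, 0, 0)
--     notina   = 0
--     notinb   = 0
--     notinc   = 0
--     if ina  == 0: notina = 1
--     if inb  == 0: notinb = 1
--     if inc  == 0: notinc = 1
--     Qa   = (notina  &    inb) | (notina  &    inc) | (   inb &    inc) ##Qa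
--     Qb   = (   ina  &    inb) | (   ina  & notinc) | (   inb & notinc) ##Qb
--     Qc   = (notina  &    inb) | (notina  & notinc) | (   inb & notinc) ##Qc
--     Qabc = (Qa << 2) + (Qb << 1) + Qc
--     return Qabc
--
-- def sboxstage(a, width):
--     result = 0
--     j      = 0
--     for i in range(0, width, 3):
--         lo = i
--         hi = i + 2
--         hi = min(width - 1, i + 2)
--         ##if hi >= width:
--         ##    lo = width - 3
--         ##    hi = width - 1
--         result = result + (sbox3x3(bitssel(a, hi, lo)) << i) ##include hi lo
--     result = result & (~(-1 << width))
--     return result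
-- ===== SOURCE B (Python) =====
-- # Bit-sliced: apply the S-box's three boolean output functions to ALL 3-bit groups
-- # at once with whole-integer bitwise operations -- no loop, no per-group work.
-- def sboxstage(a, width):
--     mask = ~(-1 << width)
--     m = a & mask
--     g = (width + 2) // 3                 # number of 3-bit groups
--     M = ((1 << (3 * g)) - 1) // 7        # ...001001001: one marker bit per group
--     c = m & M                            # plane of all inc bits
--     b = (m >> 1) & M                     # plane of all inb bits
--     t = (m >> 2) & M                     # plane of all ina bits
--     na = M & ~t                          # plane of all notina bits
--     nc = M & ~c                          # plane of all notinc bits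
--     Qa = (na & b) | (na & c) | (b & c)
--     Qb = (t & b) | (t & nc) | (b & nc)
--     Qc = (na & b) | (na & nc) | (b & nc)
--     return ((Qa << 2) | (Qb << 1) | Qc) & mask
-- ===== Notes on version B (the rewrite author's own statement) =====
-- stated objective: alternative
-- what changed: B is loop-free and bit-sliced: instead of A's per-group loop that recomputes the S-box boolean algebra for every 3-bit group, B builds a closed-form marker mask ((1<<3g)-1)//7 and applies the S-box's three boolean output functions to all groups simultaneously with whole-integer bitwise operations.
import Mathlib
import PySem

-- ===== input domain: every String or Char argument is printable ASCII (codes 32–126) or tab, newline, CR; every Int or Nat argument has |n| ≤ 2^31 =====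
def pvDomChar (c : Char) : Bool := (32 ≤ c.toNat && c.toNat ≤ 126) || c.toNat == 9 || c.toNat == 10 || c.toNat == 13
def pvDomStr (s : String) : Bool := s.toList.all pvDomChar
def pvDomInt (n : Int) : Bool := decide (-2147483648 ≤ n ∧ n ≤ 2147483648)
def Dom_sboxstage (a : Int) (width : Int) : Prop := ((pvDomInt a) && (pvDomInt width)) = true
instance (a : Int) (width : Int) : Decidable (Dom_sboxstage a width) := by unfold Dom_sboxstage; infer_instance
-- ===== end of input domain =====

-- B replaces A's per-group loop (boolean-algebra S-box recomputed for each 3-bit group)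
-- by a loop-free bit-sliced computation: the S-box's three output functions are applied
-- to all groups at once with whole-integer bitwise operations; objective: alternative.

-- ===== PORT A =====
-- shift amounts go through .toNat: exact for hi+1 ≥ 0 and lo ≥ 0, which holds at every
-- call site admitted by Pre_ (Python raises ValueError on a negative shift count)
def pvBitssel (a : Int) (hi : Int) (lo : Int) : Int :=
  let result := PySem.Int.band a (Int.not ((-1 : Int) <<< (hi + 1).toNat))
  let result := result >>> lo.toNat
  result

def pvSbox3x3 (a : Int) : Int :=
  let ina := pvBitssel a 2 2
  let inb := pvBitssel a 1 1
  let inc := pvBitssel a 0 0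
  let notina : Int := 0
  let notinb : Int := 0
  let notinc : Int := 0
  let notina := if ina = 0 then 1 else notina
  let notinb := if inb = 0 then 1 else notinb
  let notinc := if inc = 0 then 1 else notinc
  let _ := notinb  -- notinb is computed but unused, as in the Python
  let Qa := PySem.Int.bor (PySem.Int.bor (PySem.Int.band notina inb) (PySem.Int.band notina inc)) (PySem.Int.band inb inc)
  let Qb := PySem.Int.bor (PySem.Int.bor (PySem.Int.band ina inb) (PySem.Int.band ina notinc)) (PySem.Int.band inb notinc)
  let Qc := PySem.Int.bor (PySem.Int.bor (PySem.Int.band notina inb) (PySem.Int.band notina notinc)) (PySem.Int.band inb notinc)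
  let Qabc := (Qa <<< 2) + (Qb <<< 1) + Qc
  Qabc

def sboxstage (a : Int) (width : Int) : Int :=
  let result : Int := 0
  let result := (PySem.List.pyRange 0 width 3).foldl (fun result i =>
    let lo := i
    let hi := i + 2
    let hi := min (width - 1) (i + 2)
    let _ := hi  -- first binding of hi is immediately overwritten, as in the Python
    result + (pvSbox3x3 (pvBitssel a hi lo) <<< i.toNat)) result
  let result := PySem.Int.band result (Int.not ((-1 : Int) <<< width.toNat))
  result

-- ===== PORT B =====
-- bit-sliced Source B, line for line; Python's <<, >>, ~, &, |, // are Lean's <<<, >>>,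
-- Int.not, PySem.Int.band/bor, PySem.Int.floordiv (shift counts ≥ 0 under Pre_)
def sboxstage_alt (a : Int) (width : Int) : Int :=
  let mask := Int.not ((-1 : Int) <<< width.toNat)
  let m := PySem.Int.band a mask
  let g := PySem.Int.floordiv (width + 2) 3
  let M := PySem.Int.floordiv (((1 : Int) <<< (3 * g).toNat) - 1) 7
  let c := PySem.Int.band m M
  let b := PySem.Int.band (m >>> (1 : Nat)) M
  let t := PySem.Int.band (m >>> (2 : Nat)) M
  let na := PySem.Int.band M (Int.not t)
  let nc := PySem.Int.band M (Int.not c)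
  let Qa := PySem.Int.bor (PySem.Int.bor (PySem.Int.band na b) (PySem.Int.band na c)) (PySem.Int.band b c)
  let Qb := PySem.Int.bor (PySem.Int.bor (PySem.Int.band t b) (PySem.Int.band t nc)) (PySem.Int.band b nc)
  let Qc := PySem.Int.bor (PySem.Int.bor (PySem.Int.band na b) (PySem.Int.band na nc)) (PySem.Int.band b nc)
  PySem.Int.band (PySem.Int.bor (PySem.Int.bor (Qa <<< (2 : Nat)) (Qb <<< (1 : Nat))) Qc) mask

-- ===== PRECONDITION & SPEC =====
-- Pre_ excludes width < 0, on which Python A raises ValueError ('negative shift count')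
-- at the final mask ~(-1 << width)
def Pre_sboxstage (a : Int) (width : Int) : Prop := 0 ≤ width
instance (a : Int) (width : Int) : Decidable (Pre_sboxstage a width) := by unfold Pre_sboxstage; infer_instance
def pvWitness_sboxstage : Int × Int := (43, 6)

def Spec_sboxstage (a : Int) (width : Int) (out : Int) : Prop := out = sboxstage_alt a width
instance (a : Int) (width : Int) (out : Int) : Decidable (Spec_sboxstage a width out) := by unfold Spec_sboxstage; infer_instance

-- ===== CLAIM (what is proved, stated in full; the proofs are below) =====
def Claim_equal_sboxstage : Prop := ∀ (a : Int) (width : Int), Dom_sboxstage a width → Pre_sboxstage a width → Spec_sboxstage a width (sboxstage a width)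

-- ===== LEMMAS AND PROOFS =====

-- proof-only reference shapes: the 3-bit S-box as a Nat value table, the staged result
-- as a base-8 recursion, the marker mask …001001001 as a recursion, and B's bit planes
-- as a Nat expression
def pvSb (v : Nat) : Nat := [1, 4, 7, 5, 2, 0, 3, 6].getD v 0

def pvSN (m : Nat) : Nat → Nat
  | 0 => 0
  | g + 1 => 2 ^ 3 * pvSN (m / 8) g + pvSb (m % 8)

def pvMN : Nat → Nat
  | 0 => 0
  | g + 1 => 2 ^ 3 * pvMN g + 1

def pvBN (m g : Nat) : Nat :=
  let M := pvMN g
  let c := m &&& M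
  let b := (m >>> 1) &&& M
  let t := (m >>> 2) &&& M
  let na := M ^^^ t
  let nc := M ^^^ c
  let Qa := (na &&& b) ||| (na &&& c) ||| (b &&& c)
  let Qb := (t &&& b) ||| (t &&& nc) ||| (b &&& nc)
  let Qc := (na &&& b) ||| (na &&& nc) ||| (b &&& nc)
  (Qa <<< 2) ||| (Qb <<< 1) ||| Qc

-- generic facts about Python's bitwise operators -----------------------------------
theorem pv_int_not_eq (x : Int) : Int.not x = -x - 1 := by
  cases x <;> simp [Int.not] <;> omega

theorem pv_mask_eq (k : Nat) : Int.not ((-1 : Int) <<< k) = 2 ^ k - 1 := by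
  rw [pv_int_not_eq, Int.shiftLeft_eq]; ring

theorem pv_shr_ofNat (m n : Nat) : ((m : Int)) >>> n = ((m >>> n : Nat) : Int) := rfl

theorem pv_shl_ofNat (m n : Nat) : ((m : Int)) <<< n = ((m <<< n : Nat) : Int) := by
  rw [Int.shiftLeft_eq, Nat.shiftLeft_eq]; push_cast; ring

theorem pv_band_mask (a : Int) (k : Nat) :
    PySem.Int.band a ((2 : Int) ^ k - 1) = a % (2 : Int) ^ k := by
  have hp : (1 : Nat) ≤ 2 ^ k := Nat.one_le_two_pow
  have hcast : ((2 : Int) ^ k - 1) = ((2 ^ k - 1 : Nat) : Int) := by push_cast [hp]; ring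
  have h1 : (0 : Int) < 2 ^ k := by positivity
  have h2 : (0 : Int) ≤ 2 ^ k - 1 := by
    have := Int.lt_iff_add_one_le.mp h1; linarith
  cases a with
  | ofNat m =>
    rw [Int.ofNat_eq_natCast, hcast, PySem.Int.band_natCast, Nat.and_two_pow_sub_one_eq_mod]
    push_cast; ring
  | negSucc m =>
    have hneg : ¬ (0 ≤ Int.negSucc m) := not_le.mpr (Int.negSucc_lt_zero m)
    unfold PySem.Int.band
    rw [if_neg hneg, if_pos h2]
    have hbt : ((2 : Int) ^ k - 1).toNat = 2 ^ k - 1 := by rw [hcast]; exact Int.toNat_natCast _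
    have hmt : (-(Int.negSucc m) - 1) = (m : Int) := by rw [Int.negSucc_eq]; ring
    rw [hbt, hmt, Int.toNat_natCast, Nat.and_comm, Nat.and_two_pow_sub_one_eq_mod]
    have hr : m % 2 ^ k < 2 ^ k := Nat.mod_lt _ (by positivity)
    have hq : 2 ^ k * (m / 2 ^ k) + m % 2 ^ k = m := Nat.div_add_mod m (2 ^ k)
    have hq' : ((2 ^ k : Nat) : Int) * ((m / 2 ^ k : Nat) : Int) + ((m % 2 ^ k : Nat) : Int) = (m : Int) := by
      exact_mod_cast hq
    have hc : ((2 ^ k - 1 - m % 2 ^ k : Nat) : Int) = ((2 ^ k : Nat) : Int) - 1 - ((m % 2 ^ k : Nat) : Int) := by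
      omega
    have hrepr : Int.negSucc m =
        ((2 ^ k - 1 - m % 2 ^ k : Nat) : Int) + ((2 ^ k : Nat) : Int) * (-(((m / 2 ^ k : Nat)) : Int) - 1) := by
      rw [Int.negSucc_eq, hc]; linear_combination hq'
    have hPc : (((2 : Nat) ^ k : Nat) : Int) = (2 : Int) ^ k := by push_cast; ring
    rw [hrepr, ← hPc, Int.add_mul_emod_self_left, Int.emod_eq_of_lt (by omega) (by omega)]

theorem pv_band_not (x y : Nat) :
    PySem.Int.band (x : Int) (Int.not (y : Int)) = ((x - (x &&& y) : Nat) : Int) := by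
  unfold PySem.Int.band
  rw [pv_int_not_eq]
  rw [if_pos (by positivity), if_neg (by omega)]
  norm_num

theorem pv_add_eq_or (z : Nat) : ∀ y : Nat, z &&& y = 0 → z + y = z ||| y := by
  induction z using Nat.binaryRec with
  | zero => simp
  | bit b n ih =>
    intro y h
    induction y using Nat.binaryRec with
    | zero => simp
    | bit c m _ =>
      rw [Nat.land_bit] at h
      rw [Nat.lor_bit]
      have hb : (b && c) = false ∧ n &&& m = 0 := by
        cases hbc : (b && c) <;> rw [hbc] at h <;> simp [Nat.bit] at h ⊢ <;> omega
      have hih := ih m hb.2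
      clear h ih
      cases b <;> cases c <;>
        simp only [Nat.bit, Bool.and_self, Bool.or_self, Bool.false_or,
          Bool.or_false, cond_true, cond_false] at hb ⊢ <;>
        first | omega | simp at hb

theorem pv_sub_eq_xor (x y : Nat) (h : y &&& x = y) : x - y = x ^^^ y := by
  have hxy : x &&& y = y := by rw [Nat.land_comm]; exact h
  have hz : (x ^^^ y) &&& y = 0 := by
    rw [Nat.and_xor_distrib_right, hxy, Nat.and_self, Nat.xor_self]
  have hor : (x ^^^ y) ||| y = x := by
    apply Nat.eq_of_testBit_eq
    intro j
    have hj := congrArg (Nat.testBit · j) hxy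
    simp at hj ⊢
    cases hy : y.testBit j <;> cases hx : x.testBit j <;> simp_all
  have := pv_add_eq_or (x ^^^ y) y hz
  omega

-- the marker mask ------------------------------------------------------------------
theorem pv_MN_val (g : Nat) : 7 * pvMN g = 2 ^ (3 * g) - 1 := by
  induction g with
  | zero => simp [pvMN]
  | succ n ih =>
    have h1 : (1 : Nat) ≤ 2 ^ (3 * n) := Nat.one_le_two_pow
    have h2 : 2 ^ (3 * (n + 1)) = 8 * 2 ^ (3 * n) := by rw [Nat.mul_add, pow_add]; ring
    simp [pvMN]; omega

theorem pv_MN_div (g : Nat) : (2 ^ (3 * g) - 1) / 7 = pvMN g := by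
  have := pv_MN_val g
  omega

theorem pv_testBit_MN (g : Nat) : ∀ j, (pvMN g).testBit j =
    (decide (j % 3 = 0) && decide (j < 3 * g)) := by
  induction g with
  | zero => intro j; simp [pvMN]
  | succ n ih =>
    intro j
    rw [pvMN, Nat.testBit_two_pow_mul_add _ (by norm_num : (1:Nat) < 2^3)]
    by_cases hj : j < 3
    · rw [if_pos hj]
      interval_cases j <;> simp <;> decide
    · rw [if_neg hj, ih (j - 3),
        decide_eq_decide.mpr (by omega : ((j-3) % 3 = 0) ↔ (j % 3 = 0)),
        decide_eq_decide.mpr (by omega : (j-3 < 3*n) ↔ (j < 3*(n+1)))]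

-- bits of the reference recursion --------------------------------------------------
theorem pv_sb_lt (v : Nat) : pvSb v < 8 := by
  by_cases h : v < 8
  · interval_cases v <;> decide
  · rw [pvSb, List.getD_eq_default _ _ (by simpa using Nat.le_of_not_lt h)]; norm_num

theorem pv_testBit_SN (g : Nat) : ∀ m j, (pvSN m g).testBit j =
    if j < 3 * g then (pvSb (m / 2 ^ (3 * (j / 3)) % 8)).testBit (j % 3) else false := by
  induction g with
  | zero => intro m j; simp [pvSN]
  | succ n ih =>
    intro m j
    rw [pvSN, Nat.testBit_two_pow_mul_add _ (pv_sb_lt _)]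
    by_cases hj : j < 3
    · rw [if_pos hj, if_pos (by omega)]
      have h0 : j / 3 = 0 := by omega
      have h1 : j % 3 = j := by omega
      rw [h0, h1]
      norm_num
    · rw [if_neg hj, ih (m / 8) (j - 3)]
      simp only [show (j - 3 < 3 * n) ↔ (j < 3 * (n + 1)) from by omega]
      split
      · have h8 : (8:Nat) * 2 ^ (3 * ((j-3) / 3)) = 2 ^ (3 * (j / 3)) := by
          have h3 : (8:Nat) = 2^3 := by norm_num
          rw [h3, ← pow_add]
          congr 1
          omega
        rw [Nat.div_div_eq_div_mul, h8]
        congr 1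
        omega
      · rfl

-- the core equality: bit-sliced = per-group substitution ---------------------------
theorem pv_sb_bits : ∀ v : Fin 8,
    (pvSb v).testBit 2 = ((!(v : Nat).testBit 2 && (v : Nat).testBit 1) || (!(v : Nat).testBit 2 && (v : Nat).testBit 0) || ((v : Nat).testBit 1 && (v : Nat).testBit 0)) ∧
    (pvSb v).testBit 1 = (((v : Nat).testBit 2 && (v : Nat).testBit 1) || ((v : Nat).testBit 2 && !(v : Nat).testBit 0) || ((v : Nat).testBit 1 && !(v : Nat).testBit 0)) ∧
    (pvSb v).testBit 0 = ((!(v : Nat).testBit 2 && (v : Nat).testBit 1) || (!(v : Nat).testBit 2 && !(v : Nat).testBit 0) || ((v : Nat).testBit 1 && !(v : Nat).testBit 0)) := by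
  decide

theorem pv_BN_eq_SN (m g : Nat) : pvBN m g = pvSN m g := by
  apply Nat.eq_of_testBit_eq
  intro j
  obtain ⟨q, r, hr3, rfl⟩ : ∃ q r, r < 3 ∧ j = 3 * q + r := ⟨j / 3, j % 3, by omega, by omega⟩
  have hv : ∀ s, s < 3 → (m / 2 ^ (3 * q) % 8).testBit s = m.testBit (3 * q + s) := by
    intro s hs
    rw [show (8:Nat) = 2 ^ 3 by norm_num, Nat.testBit_mod_two_pow, Nat.testBit_div_two_pow]
    simp [hs]
    rw [Nat.add_comm]
  rw [pv_testBit_SN]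
  have hq3 : (3 * q + r) / 3 = q := by omega
  have hlt : (3 * q + r < 3 * g) = (q < g) := by apply propext; omega
  rw [hq3, show (3 * q + r) % 3 = r from by omega]
  simp only [show (3 * q + r < 3 * g) ↔ (q < g) from by omega]
  simp only [pvBN, Nat.testBit_or, Nat.testBit_shiftLeft, Nat.testBit_and, Nat.testBit_xor,
    Nat.testBit_shiftRight, pv_testBit_MN]
  interval_cases r
  · -- r = 0: only the un-shifted Qc term can be live
    rcases Nat.eq_zero_or_pos q with hq0 | hq0
    · subst hq0
      by_cases hq : 0 < g
      · rw [if_pos (by omega)]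
        simp only [Nat.mul_zero, Nat.zero_add] at hv
        have d0 : (decide ((0:Nat) % 3 = 0)) = true := decide_eq_true (by omega)
        have dlt : (decide (0 < 3*g)) = true := decide_eq_true (by omega)
        simp only [Nat.mul_zero, Nat.zero_add, Nat.add_zero,
          show (0:Nat) - 2 = 0 from rfl, show (0:Nat) - 1 = 0 from rfl,
          show (decide ((0:Nat) >= 2)) = false from rfl, show (decide ((0:Nat) >= 1)) = false from rfl,
          d0, dlt, Bool.and_true, Bool.true_and, Bool.false_and, Bool.false_or, Bool.true_xor]
        rw [(pv_sb_bits (Fin.mk (m / 2 ^ 0 % 8) (Nat.mod_lt _ (by norm_num)))).2.2]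
        simp only [Fin.val_mk, hv 0 (by omega), hv 1 (by omega), hv 2 (by omega),
          show 2+(0:Nat) = 2 from rfl, show 1+(0:Nat) = 1 from rfl, decide_true,
          Bool.and_true, Bool.true_and, Bool.true_xor]
      · rw [if_neg (by omega)]
        have dlt : (decide (0 < 3*g)) = false := decide_eq_false (by omega)
        simp only [Nat.mul_zero, Nat.zero_add, Nat.add_zero,
          show (0:Nat) - 2 = 0 from rfl, show (0:Nat) - 1 = 0 from rfl,
          show (decide ((0:Nat) >= 2)) = false from rfl, show (decide ((0:Nat) >= 1)) = false from rfl,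
          show (decide ((0:Nat) % 3 = 0)) = true from rfl, dlt, Bool.and_false, Bool.false_and, Bool.and_true, Bool.true_and, Bool.or_false, Bool.false_or, Bool.or_self, Bool.xor_false, Bool.false_xor, decide_true]
    · by_cases hq : q < g
      · rw [if_pos hq]
        have d0 : (decide ((3*q) % 3 = 0)) = true := decide_eq_true (by omega)
        have dA : (decide ((3*q-2) % 3 = 0)) = false := decide_eq_false (by omega)
        have dB : (decide ((3*q-1) % 3 = 0)) = false := decide_eq_false (by omega)
        have dlt : (decide (3*q < 3*g)) = true := decide_eq_true (by omega)
        simp only [show 3*q+0-2 = 3*q-2 from by omega, show 3*q+0-1 = 3*q-1 from by omega,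
          Nat.add_zero, d0, dA, dB, dlt, Bool.and_true, Bool.true_and, Bool.and_false,
          Bool.false_and, Bool.or_false, Bool.false_or, Bool.true_xor, Bool.xor_false]
        rw [(pv_sb_bits (Fin.mk (m / 2 ^ (3*q) % 8) (Nat.mod_lt _ (by norm_num)))).2.2]
        simp only [Fin.val_mk, hv 0 (by omega), hv 1 (by omega), hv 2 (by omega), Nat.add_zero,
          show 2+3*q = 3*q+2 from by omega, show 1+3*q = 3*q+1 from by omega]
      · rw [if_neg hq]
        have dA : (decide ((3*q-2) % 3 = 0)) = false := decide_eq_false (by omega)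
        have dB : (decide ((3*q-1) % 3 = 0)) = false := decide_eq_false (by omega)
        have dlt : (decide (3*q < 3*g)) = false := decide_eq_false (by omega)
        have d0 : (decide ((3*q) % 3 = 0)) = true := decide_eq_true (by omega)
        simp only [show 3*q+0-2 = 3*q-2 from by omega, show 3*q+0-1 = 3*q-1 from by omega,
          Nat.add_zero, d0, dA, dB, dlt, Bool.and_false, Bool.false_and, Bool.and_true, Bool.true_and, Bool.or_false, Bool.false_or, Bool.or_self, Bool.xor_false, Bool.false_xor, decide_true]
  · -- r = 1: only the Qb <<< 1 term can be live
    rcases Nat.eq_zero_or_pos q with hq0 | hq0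
    · subst hq0
      by_cases hq : 0 < g
      · rw [if_pos (by omega)]
        simp only [Nat.mul_zero, Nat.zero_add] at hv
        have d0 : (decide ((0:Nat) % 3 = 0)) = true := decide_eq_true (by omega)
        have d1 : (decide ((1:Nat) % 3 = 0)) = false := decide_eq_false (by omega)
        have dlt : (decide (0 < 3*g)) = true := decide_eq_true (by omega)
        simp only [Nat.mul_zero, Nat.zero_add, Nat.add_zero,
          show (1:Nat) - 2 = 0 from rfl, show (1:Nat) - 1 = 0 from rfl,
          show (decide ((1:Nat) >= 2)) = false from rfl, show (decide ((1:Nat) >= 1)) = true from rfl,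
          d0, d1, dlt, Bool.and_true, Bool.true_and, Bool.false_and, Bool.and_false,
          Bool.false_or, Bool.or_false, Bool.true_xor]
        rw [(pv_sb_bits (Fin.mk (m / 2 ^ 0 % 8) (Nat.mod_lt _ (by norm_num)))).2.1]
        simp only [Fin.val_mk, hv 0 (by omega), hv 1 (by omega), hv 2 (by omega),
          show 2+(0:Nat) = 2 from rfl, show 1+(0:Nat) = 1 from rfl, decide_true,
          Bool.and_true, Bool.true_and, Bool.true_xor, Bool.xor_self, Bool.and_false,
          Bool.false_and, Bool.or_false]
      · rw [if_neg (by omega)]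
        have dlt : (decide (0 < 3*g)) = false := decide_eq_false (by omega)
        have d1 : (decide ((1:Nat) % 3 = 0)) = false := decide_eq_false (by omega)
        simp only [Nat.mul_zero, Nat.zero_add, Nat.add_zero,
          show (1:Nat) - 2 = 0 from rfl, show (1:Nat) - 1 = 0 from rfl,
          show (decide ((1:Nat) >= 2)) = false from rfl, show (decide ((1:Nat) >= 1)) = true from rfl,
          show (decide ((0:Nat) % 3 = 0)) = true from rfl, dlt, d1, Bool.and_false, Bool.false_and, Bool.and_true, Bool.true_and, Bool.or_false, Bool.false_or, Bool.or_self, Bool.xor_false, Bool.false_xor, decide_true]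
    · by_cases hq : q < g
      · rw [if_pos hq]
        have d0 : (decide ((3*q) % 3 = 0)) = true := decide_eq_true (by omega)
        have dA : (decide ((3*q+1-2) % 3 = 0)) = false := decide_eq_false (by omega)
        have d1 : (decide ((3*q+1) % 3 = 0)) = false := decide_eq_false (by omega)
        have dlt : (decide (3*q < 3*g)) = true := decide_eq_true (by omega)
        have dge1 : (decide (3*q+1 >= 1)) = true := decide_eq_true (by omega)
        simp only [show 3*q+1-1 = 3*q from by omega,
          d0, dA, d1, dlt, dge1, Bool.and_true, Bool.true_and, Bool.and_false,
          Bool.false_and, Bool.or_false, Bool.false_or, Bool.true_xor, Bool.xor_false]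
        rw [(pv_sb_bits (Fin.mk (m / 2 ^ (3*q) % 8) (Nat.mod_lt _ (by norm_num)))).2.1]
        simp only [Fin.val_mk, hv 0 (by omega), hv 1 (by omega), hv 2 (by omega), Nat.add_zero,
          show 2+3*q = 3*q+2 from by omega, show 1+3*q = 3*q+1 from by omega]
      · rw [if_neg hq]
        have dA : (decide ((3*q+1-2) % 3 = 0)) = false := decide_eq_false (by omega)
        have d1 : (decide ((3*q+1) % 3 = 0)) = false := decide_eq_false (by omega)
        have dlt : (decide (3*q < 3*g)) = false := decide_eq_false (by omega)
        have d0 : (decide ((3*q) % 3 = 0)) = true := decide_eq_true (by omega)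
        simp only [show 3*q+1-1 = 3*q from by omega, d0, dA, d1, dlt, Bool.and_false, Bool.false_and, Bool.and_true, Bool.true_and, Bool.or_false, Bool.false_or, Bool.or_self, Bool.xor_false, Bool.false_xor, decide_true]
  · by_cases hq : q < g
    · rw [if_pos hq]
      have d0 : (decide ((3*q) % 3 = 0)) = true := decide_eq_true (by omega)
      have d1 : (decide ((3*q+1) % 3 = 0)) = false := decide_eq_false (by omega)
      have d2 : (decide ((3*q+2) % 3 = 0)) = false := decide_eq_false (by omega)
      have dlt : (decide (3*q < 3*g)) = true := decide_eq_true (by omega)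
      have dge : (decide (3*q+2 ≥ 2)) = true := decide_eq_true (by omega)
      simp only [show 3*q+2-2 = 3*q from by omega, show 3*q+2-1 = 3*q+1 from by omega,
        show 2+3*q = 3*q+2 from by omega, show 1+3*q = 3*q+1 from by omega,
        d0, d1, d2, dlt, dge, Bool.and_true, Bool.true_and, Bool.and_false, Bool.false_and,
        Bool.or_false, Bool.true_xor, Bool.xor_false]
      rw [(pv_sb_bits ⟨m / 2 ^ (3*q) % 8, Nat.mod_lt _ (by norm_num)⟩).1]
      simp only [Fin.val_mk, hv 0 (by omega), hv 1 (by omega), hv 2 (by omega), Nat.add_zero]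
    · rw [if_neg hq]
      have d1 : (decide ((3*q+1) % 3 = 0)) = false := decide_eq_false (by omega)
      have d2 : (decide ((3*q+2) % 3 = 0)) = false := decide_eq_false (by omega)
      have dlt : (decide (3*q < 3*g)) = false := decide_eq_false (by omega)
      have d0 : (decide ((3*q) % 3 = 0)) = true := decide_eq_true (by omega)
      simp only [show 3*q+2-2 = 3*q from by omega, show 3*q+2-1 = 3*q+1 from by omega,
        d0, d1, d2, dlt, Bool.and_false, Bool.false_and, Bool.true_and, Bool.or_false,
        Bool.false_or, Bool.or_self, Bool.xor_false, Bool.false_xor]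


-- A reduces to the reference recursion ---------------------------------------------
theorem pv_sum_SN (g : Nat) : ∀ m : Nat,
    (List.map (fun k => ((pvSb (m / 2 ^ (3*k) % 8) : Nat) : Int) * 2 ^ (3*k)) (List.range g)).sum
      = ((pvSN m g : Nat) : Int) := by
  induction g with
  | zero => intro m; simp [pvSN]
  | succ n ih =>
    intro m
    rw [List.range_succ_eq_map, List.map_cons, List.map_map, List.sum_cons]
    have hterm : ((fun k => ((pvSb (m / 2 ^ (3*k) % 8) : Nat) : Int) * 2 ^ (3*k)) ∘ Nat.succ)
        = fun k => 8 * (((pvSb ((m / 8) / 2 ^ (3*k) % 8) : Nat) : Int) * 2 ^ (3*k)) := by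
      funext k
      simp only [Function.comp]
      have e1 : (m / 8) / 2 ^ (3*k) = m / 2 ^ (3*(k+1)) := by
        rw [Nat.div_div_eq_div_mul]
        congr 1
        rw [show (8:Nat) = 2^3 by norm_num, ← pow_add]
        congr 1
        omega
      have e2 : (2:Int) ^ (3*(k+1)) = 8 * 2 ^ (3*k) := by
        rw [show 3*(k+1) = 3*k+3 by ring, pow_add]
        ring
      rw [e1, show Nat.succ k = k + 1 from rfl, e2]
      ring
    rw [hterm, List.sum_map_mul_left, ih (m / 8)]
    simp [pvSN]
    ring

theorem pv_sbox_sb : ∀ v : Fin 8, pvSbox3x3 ((v : Nat) : Int) = ((pvSb v : Nat) : Int) := by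
  decide

theorem pv_term_eq (a width i : Int) (h0 : 0 ≤ i) (h1 : i < width) :
    pvSbox3x3 (pvBitssel a (min (width - 1) (i + 2)) i)
      = ((pvSb ((a % 2 ^ width.toNat).toNat / 2 ^ i.toNat % 8) : Nat) : Int) := by
  obtain ⟨n, rfl⟩ : ∃ n : Nat, i = (n : Int) := ⟨i.toNat, (Int.toNat_of_nonneg h0).symm⟩
  obtain ⟨w, rfl⟩ : ∃ w : Nat, width = (w : Int) := ⟨width.toNat, (Int.toNat_of_nonneg (by omega)).symm⟩
  have hnw : n < w := by exact_mod_cast h1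
  simp only [pvBitssel, Int.toNat_natCast]
  have htoNat : (min ((w : Int) - 1) ((n : Int) + 2) + 1).toNat = min w (n + 3) := by omega
  rw [htoNat, pv_mask_eq, pv_band_mask]
  set h := min w (n + 3) with hh
  set mw := (a % (2 : Int) ^ w).toNat with hmw
  have hw0 : (0 : Int) < 2 ^ w := by positivity
  have hmweq : a % (2 : Int) ^ w = ((mw : Nat) : Int) :=
    (Int.toNat_of_nonneg (Int.emod_nonneg a (by positivity))).symm
  have hcw : (((2 : Nat) ^ w : Nat) : Int) = (2 : Int) ^ w := by push_cast; ring
  have hmwlt : mw < 2 ^ w := by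
    have hlt := Int.emod_lt_of_pos a hw0
    rw [hmweq, ← hcw] at hlt
    exact_mod_cast hlt
  have hmod : a % (2 : Int) ^ h = ((mw % 2 ^ h : Nat) : Int) := by
    have hdvd : ((2 : Int) ^ h ∣ (2 : Int) ^ w) := pow_dvd_pow 2 (by omega)
    rw [← Int.emod_emod_of_dvd a hdvd, hmweq]
    push_cast; ring
  rw [hmod, pv_shr_ofNat, Nat.shiftRight_eq_div_pow]
  have hkey : mw % 2 ^ h / 2 ^ n = mw / 2 ^ n % 8 := by
    have h8 : mw / 2 ^ n % 8 = mw % (2 ^ n * 8) / 2 ^ n := (Nat.mod_mul_right_div_self mw (2 ^ n) 8).symm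
    have hpow : 2 ^ n * 8 = 2 ^ (n + 3) := by rw [pow_add]; norm_num
    rw [h8, hpow]
    by_cases hc : n + 3 ≤ w
    · have hhh : h = n + 3 := by omega
      rw [hhh]
    · have hhw : h = w := by omega
      have l1 : mw % 2 ^ w = mw := Nat.mod_eq_of_lt hmwlt
      have l2 : mw % 2 ^ (n + 3) = mw :=
        Nat.mod_eq_of_lt (lt_of_lt_of_le hmwlt (Nat.pow_le_pow_right (by norm_num) (by omega)))
      rw [hhw, l1, l2]
  rw [hkey]
  exact pv_sbox_sb ⟨mw / 2 ^ n % 8, Nat.mod_lt _ (by norm_num)⟩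

theorem pv_range_eq (w : Nat) :
    PySem.List.pyRange 0 (w : Int) 3 = List.map (fun k : Nat => ((3 * k : Nat) : Int)) (List.range ((w + 2) / 3)) := by
  rw [PySem.List.pyRange_of_pos 0 (w : Int) (by norm_num : (0:Int) < 3)]
  have hc : (if (0:Int) < (w:Int) then (((w:Int) - 0 + 3 - 1) / 3).toNat else 0) = (w + 2) / 3 := by
    split <;> omega
  rw [hc]
  apply List.map_congr_left
  intro k _
  push_cast
  ring

theorem pv_A_eq (a : Int) (w : Nat) :
    sboxstage a (w : Int)
      = ((pvSN (a % 2 ^ w : Int).toNat ((w + 2) / 3) &&& (2 ^ w - 1) : Nat) : Int) := by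
  simp only [sboxstage]
  rw [PySem.List.foldl_add, pv_range_eq w, List.map_map]
  have hmap : ∀ f : Nat → Int, (∀ k ∈ List.range ((w + 2) / 3),
        f k = ((pvSb ((a % 2 ^ w : Int).toNat / 2 ^ (3*k) % 8) : Nat) : Int) * 2 ^ (3*k)) →
      List.map f (List.range ((w + 2) / 3))
        = List.map (fun k => ((pvSb ((a % 2 ^ w : Int).toNat / 2 ^ (3*k) % 8) : Nat) : Int) * 2 ^ (3*k)) (List.range ((w + 2) / 3)) :=
    fun f h => List.map_congr_left h
  rw [hmap _ (by
    intro k hk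
    rw [List.mem_range] at hk
    simp only [Function.comp]
    have h3k : ((3 * k : Nat) : Int) < (w : Int) := by exact_mod_cast (by omega : 3 * k < w)
    rw [pv_term_eq a (w : Int) ((3 * k : Nat) : Int) (by positivity) h3k]
    rw [Int.toNat_natCast, Int.toNat_natCast, Int.shiftLeft_eq])]
  rw [pv_sum_SN ((w + 2) / 3) (a % 2 ^ w : Int).toNat]
  rw [zero_add, Int.toNat_natCast, pv_mask_eq, pv_band_mask, Nat.and_two_pow_sub_one_eq_mod]
  push_cast
  ring

-- B reduces to the bit-sliced Nat expression ---------------------------------------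
theorem pv_B_eq (a : Int) (w : Nat) :
    sboxstage_alt a (w : Int)
      = ((pvBN (a % 2 ^ w : Int).toNat ((w + 2) / 3) &&& (2 ^ w - 1) : Nat) : Int) := by
  have hmw : a % (2:Int) ^ w = (((a % 2 ^ w : Int).toNat : Nat) : Int) :=
    (Int.toNat_of_nonneg (Int.emod_nonneg a (by positivity))).symm
  set mw := (a % (2:Int) ^ w).toNat with hmwdef
  set gN := (w + 2) / 3 with hgNdef
  simp only [sboxstage_alt]
  rw [Int.toNat_natCast, pv_mask_eq, pv_band_mask a, hmw]
  rw [show PySem.Int.floordiv ((w:Int) + 2) 3 = ((gN : Nat) : Int) from by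
    rw [show ((w:Int) + 2) = ((w + 2 : Nat) : Int) by push_cast; ring,
      show (3:Int) = ((3:Nat):Int) from rfl, PySem.Int.floordiv_natCast, hgNdef]]
  rw [show ((3:Int) * ((gN : Nat) : Int)).toNat = 3 * gN from by omega]
  rw [show PySem.Int.floordiv (((1:Int) <<< (3 * gN)) - 1) 7 = ((pvMN gN : Nat) : Int) from by
    rw [Int.shiftLeft_eq, one_mul,
      show ((2:Int) ^ (3 * gN) - 1) = ((2 ^ (3 * gN) - 1 : Nat) : Int) by
        have h1 : (1:Nat) ≤ 2 ^ (3 * gN) := Nat.one_le_two_pow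
        push_cast [h1]; ring,
      show (7:Int) = ((7:Nat):Int) from rfl, PySem.Int.floordiv_natCast, pv_MN_div]]
  rw [pv_shr_ofNat, pv_shr_ofNat]
  simp only [PySem.Int.band_natCast]
  rw [pv_band_not, pv_band_not]
  have hsub : ∀ x : Nat, pvMN gN - (pvMN gN &&& (x &&& pvMN gN)) = pvMN gN ^^^ (x &&& pvMN gN) := by
    intro x
    have h1 : (x &&& pvMN gN) &&& pvMN gN = x &&& pvMN gN := by
      rw [Nat.land_assoc, Nat.and_self]
    have h2 : pvMN gN &&& (x &&& pvMN gN) = x &&& pvMN gN := by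
      rw [Nat.land_comm]; exact h1
    rw [h2, pv_sub_eq_xor _ _ h1]
  rw [hsub, hsub]
  simp only [PySem.Int.band_natCast, PySem.Int.bor_natCast, pv_shl_ofNat]
  rw [show ((2:Int) ^ w - 1) = ((2 ^ w - 1 : Nat) : Int) from by
    have h1 : (1:Nat) ≤ 2 ^ w := Nat.one_le_two_pow
    push_cast [h1]; ring]
  rw [PySem.Int.band_natCast]
  simp only [pvBN]

-- ===== VERDICT (by name: the statement is the Claim_ definition above) =====
theorem sboxstage_spec : Claim_equal_sboxstage := by
  intro a width _hDom hPre
  unfold Spec_sboxstage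
  obtain ⟨w, rfl⟩ : ∃ w : Nat, width = (w : Int) := ⟨width.toNat, (Int.toNat_of_nonneg hPre).symm⟩
  rw [pv_A_eq, pv_B_eq, pv_BN_eq_SN]
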